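-- pv_equiv track=rewrite | github.com/Sdas08217/LeetCode | Mar_2025/Mar_01.py | applyOperations
-- ===== SOURCE A (Python) =====
-- from typing import List
--
-- def applyOperations(nums: List[int]) -> List[int]:
--     n = len(nums)
--
--     # Step 1: Apply the operations sequentially
--     for i in range(n - 1):
--         if nums[i] == nums[i + 1]:
--             nums[i] *= 2
--             nums[i + 1] = 0
--
--     # Step 2: Shift all zeros to the end
--     # Collect non-zero elements while preserving their order
--     non_zero = [num for num in nums if num != 0]
--
--     # Create the result by appending zeros
--     # Number of zeros = original length - number of non-zero elements
--     result = non_zero + [0] * (n - len(non_zero))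
--
--     return result
-- ===== SOURCE B (Python) =====
-- from typing import List
--
-- def applyOperations(nums: List[int]) -> List[int]:
--     # Single pass carrying the previous element; no mutation of nums
--     # (A mutates nums in place; return values agree).
--     if not nums:
--         return []
--     res = []
--     zeros = 0
--     prev = nums[0]
--     for cur in nums[1:]:
--         if prev == cur:
--             if prev != 0:
--                 res.append(prev * 2)
--             else:
--                 zeros += 1
--             prev = 0
--         else:
--             if prev != 0:
--                 res.append(prev)
--             else:
--                 zeros += 1
--             prev = cur
--     if prev != 0:
--         res.append(prev)
--     else:
--         zeros += 1
--     return res + [0] * zeros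
-- ===== Notes on version B (the rewrite author's own statement) =====
-- stated objective: alternative
-- what changed: Replaces A's two passes over a mutated array (index loop writing doubles/zeros, then a filter-and-pad pass) by one pass carrying only a 'prev' accumulator and a zero counter, never mutating nums and never re-reading it.
import Mathlib
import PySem

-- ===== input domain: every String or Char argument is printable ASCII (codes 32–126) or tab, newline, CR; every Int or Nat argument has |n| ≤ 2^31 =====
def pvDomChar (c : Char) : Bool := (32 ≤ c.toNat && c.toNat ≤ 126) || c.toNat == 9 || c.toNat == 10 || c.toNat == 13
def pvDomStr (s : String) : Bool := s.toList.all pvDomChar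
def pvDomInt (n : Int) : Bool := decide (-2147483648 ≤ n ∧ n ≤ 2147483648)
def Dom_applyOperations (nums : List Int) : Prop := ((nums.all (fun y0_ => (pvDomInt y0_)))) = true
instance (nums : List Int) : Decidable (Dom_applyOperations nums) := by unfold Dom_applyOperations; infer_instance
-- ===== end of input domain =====

-- B does one pass with a carried 'prev' accumulator and a zero counter instead of A's
-- two passes over a mutated array; A mutates nums in place (B does not) — the claim is
-- about the return value only.

-- ===== PORT A =====
-- the in-place doubling loop: after step i, position i is final and position i+1
-- (possibly just zeroed) is compared with position i+2 next
def pvTransformA : List Int → List Int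
  | [] => []
  | [a] => [a]
  | a :: b :: rest =>
      if a = b then a * 2 :: pvTransformA (0 :: rest)
      else a :: pvTransformA (b :: rest)
  termination_by l => l.length

def applyOperations (nums : List Int) : List Int :=
  let n := nums.length
  let t := pvTransformA nums
  let nonZero := t.filter (fun num => num ≠ 0)
  nonZero ++ List.replicate (n - nonZero.length) 0

-- ===== PORT B =====
-- loop body of Source B: state = (res, zeros, prev)
def pvStepB (st : List Int × Nat × Int) (cur : Int) : List Int × Nat × Int :=
  let res := st.1
  let zeros := st.2.1
  let prev := st.2.2
  if prev = cur then
    ((if prev ≠ 0 then res ++ [prev * 2] else res),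
     (if prev ≠ 0 then zeros else zeros + 1), 0)
  else
    ((if prev ≠ 0 then res ++ [prev] else res),
     (if prev ≠ 0 then zeros else zeros + 1), cur)

def applyOperations_alt (nums : List Int) : List Int :=
  match nums with
  | [] => []
  | p :: rest =>
      let st := rest.foldl pvStepB ([], 0, p)
      (if st.2.2 ≠ 0 then st.1 ++ [st.2.2] else st.1)
        ++ List.replicate (if st.2.2 ≠ 0 then st.2.1 else st.2.1 + 1) 0

-- ===== PRECONDITION & SPEC =====
def Spec_applyOperations (nums : List Int) (out : List Int) : Prop := out = applyOperations_alt nums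
instance (nums : List Int) (out : List Int) : Decidable (Spec_applyOperations nums out) := by unfold Spec_applyOperations; infer_instance

-- ===== CLAIM (what is proved, stated in full; the proofs are below) =====
def Claim_equal_applyOperations : Prop := ∀ (nums : List Int), Dom_applyOperations nums → Spec_applyOperations nums (applyOperations nums)

-- ===== LEMMAS AND PROOFS =====
-- "final flush + padding" of Source B, as a function of the loop state
def pvFinish (st : List Int × Nat × Int) : List Int :=
  (if st.2.2 ≠ 0 then st.1 ++ [st.2.2] else st.1)
    ++ List.replicate (if st.2.2 ≠ 0 then st.2.1 else st.2.1 + 1) 0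

lemma pvTransformA_length (l : List Int) : (pvTransformA l).length = l.length := by
  induction l using pvTransformA.induct <;> simp_all [pvTransformA]

lemma pvFilterLen (l : List Int) :
    ((pvTransformA l).filter (fun num => num ≠ 0)).length ≤ l.length := by
  calc ((pvTransformA l).filter (fun num => num ≠ 0)).length
      ≤ (pvTransformA l).length := List.length_filter_le _ _
    _ = l.length := pvTransformA_length l

lemma keyB (rest : List Int) : ∀ (prev : Int) (acc : List Int) (z : Nat),
    pvFinish (rest.foldl pvStepB (acc, z, prev))
    = acc ++ (pvTransformA (prev :: rest)).filter (fun num => num ≠ 0)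
        ++ List.replicate
            (z + ((prev :: rest).length
              - ((pvTransformA (prev :: rest)).filter (fun num => num ≠ 0)).length)) 0 := by
  induction rest with
  | nil =>
      intro prev acc z
      by_cases h : prev = 0 <;> simp [pvTransformA, pvFinish, h]
  | cons cur rest ih =>
      intro prev acc z
      simp only [List.foldl_cons]
      by_cases hpc : prev = cur
      · subst hpc
        have hlf := pvFilterLen (0 :: rest)
        by_cases hp : prev = 0
        · subst hp
          rw [show pvStepB (acc, z, (0:Int)) 0 = (acc, z + 1, 0) from by simp [pvStepB]]
          rw [ih 0 acc (z + 1)]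
          have hf : (pvTransformA (0 :: 0 :: rest)).filter (fun num => num ≠ 0)
              = (pvTransformA (0 :: rest)).filter (fun num => num ≠ 0) := by
            simp [pvTransformA]
          rw [hf]
          have hc : z + 1 + ((0 :: rest).length
              - ((pvTransformA (0 :: rest)).filter (fun num => num ≠ 0)).length)
            = z + ((0 :: 0 :: rest).length
              - ((pvTransformA (0 :: rest)).filter (fun num => num ≠ 0)).length) := by
            simp only [List.length_cons] at hlf ⊢
            omega
          rw [hc]
        · rw [show pvStepB (acc, z, prev) prev = (acc ++ [prev * 2], z, 0) from by
              simp [pvStepB, hp]]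
          rw [ih 0 (acc ++ [prev * 2]) z]
          have hp2 : ¬ prev * 2 = 0 := by intro h; exact hp (by omega)
          have hf : (pvTransformA (prev :: prev :: rest)).filter (fun num => num ≠ 0)
              = prev * 2 :: (pvTransformA (0 :: rest)).filter (fun num => num ≠ 0) := by
            simp [pvTransformA, hp2]
          rw [hf]
          have hc : z + ((0 :: rest).length
              - ((pvTransformA (0 :: rest)).filter (fun num => num ≠ 0)).length)
            = z + ((prev :: prev :: rest).length
              - (prev * 2 :: (pvTransformA (0 :: rest)).filter (fun num => num ≠ 0)).length) := by
            simp only [List.length_cons] at hlf ⊢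
            omega
          rw [hc]
          simp [List.append_assoc]
      · have hlf := pvFilterLen (cur :: rest)
        by_cases hp : prev = 0
        · subst hp
          rw [show pvStepB (acc, z, (0:Int)) cur = (acc, z + 1, cur) from by
              simp [pvStepB, hpc]]
          rw [ih cur acc (z + 1)]
          have hf : (pvTransformA (0 :: cur :: rest)).filter (fun num => num ≠ 0)
              = (pvTransformA (cur :: rest)).filter (fun num => num ≠ 0) := by
            simp [pvTransformA, hpc]
          rw [hf]
          have hc : z + 1 + ((cur :: rest).length
              - ((pvTransformA (cur :: rest)).filter (fun num => num ≠ 0)).length)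
            = z + ((0 :: cur :: rest).length
              - ((pvTransformA (cur :: rest)).filter (fun num => num ≠ 0)).length) := by
            simp only [List.length_cons] at hlf ⊢
            omega
          rw [hc]
        · rw [show pvStepB (acc, z, prev) cur = (acc ++ [prev], z, cur) from by
              simp [pvStepB, hpc, hp]]
          rw [ih cur (acc ++ [prev]) z]
          have hf : (pvTransformA (prev :: cur :: rest)).filter (fun num => num ≠ 0)
              = prev :: (pvTransformA (cur :: rest)).filter (fun num => num ≠ 0) := by
            simp [pvTransformA, hpc, hp]
          rw [hf]
          have hc : z + ((cur :: rest).length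
              - ((pvTransformA (cur :: rest)).filter (fun num => num ≠ 0)).length)
            = z + ((prev :: cur :: rest).length
              - (prev :: (pvTransformA (cur :: rest)).filter (fun num => num ≠ 0)).length) := by
            simp only [List.length_cons] at hlf ⊢
            omega
          rw [hc]
          simp [List.append_assoc]

lemma alt_cons (p : Int) (rest : List Int) :
    applyOperations_alt (p :: rest) = pvFinish (rest.foldl pvStepB ([], 0, p)) := rfl

-- ===== VERDICT (by name: the statement is the Claim_ definition above) =====
theorem applyOperations_spec : Claim_equal_applyOperations := by
  intro nums _
  unfold Spec_applyOperations
  cases nums with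
  | nil => simp [applyOperations, applyOperations_alt, pvTransformA]
  | cons p rest =>
      rw [alt_cons, keyB rest p [] 0]
      simp [applyOperations]
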